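-- pv_equiv track=rewrite | github.com/MartinhoCaeiro/De-cipher | src/scripts/playfair.py | fix_message
-- ===== SOURCE A (Python) =====
-- from typing import Optional, Set
--
-- def fix_message(message: str, allowed_chars: Optional[Set[str]] = None, map_j: bool = True) -> str:
--     """Normalize a message for Playfair.
--
--     Only ASCII letters A..Z are retained (J mapped to I). Other characters
--     (digits, punctuation, accented letters, etc.) are removed. The result
--     is uppercased. Repeated characters in a digraph are split with 'X' and
--     the output is padded to even length with 'X'.
--     """
--     if allowed_chars is None:
--         # Default behavior: classical Playfair with A..Z and J->I mapping
--         message = ''.join(ch for ch in message.upper().replace("J", "I") if "A" <= ch <= "Z")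
--     else:
--         # Keep only characters present in allowed_chars. Do not change
--         # case or map J->I unless explicitly requested via map_j.
--         s = message
--         if map_j:
--             s = s.replace("J", "I")
--         # If we're using the classic mapping (map_j=True) the board
--         # characters are uppercase A..Z. Uppercase the input so lowercase
--         # letters are preserved when filtering against allowed_chars.
--         if map_j:
--             s = s.upper()
--         message = ''.join(ch for ch in s if ch in allowed_chars)
--     i = 0
--     result = ""
--     while i < len(message):
--         a = message[i]
--         b = message[i + 1] if i + 1 < len(message) else "X"
--         if a == b:
--             result += a + "X"
--             i += 1
--         else:
--             result += a + b
--             i += 2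
--     if len(result) % 2 != 0:
--         result += "X"
--     return result
-- ===== SOURCE B (Python) =====
-- from typing import Optional, Set
--
-- def fix_message(message: str, allowed_chars: Optional[Set[str]] = None, map_j: bool = True) -> str:
--     if allowed_chars is None:
--         norm = [ch for ch in message.upper().replace("J", "I") if "A" <= ch <= "Z"]
--     else:
--         s = message.replace("J", "I").upper() if map_j else message
--         norm = [ch for ch in s if ch in allowed_chars]
--     out = []
--     pending = None
--     for ch in norm:
--         if pending is None:
--             pending = ch
--         elif ch == pending:
--             out.append(pending)
--             out.append("X")
--             pending = ch
--         else:
--             out.append(pending)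
--             out.append(ch)
--             pending = None
--     if pending is not None:
--         out.append(pending)
--         out.append("X")
--     return "".join(out)
-- ===== Notes on version B (the rewrite author's own statement) =====
-- stated objective: idiomatic
-- what changed: The index-stepping while loop over message positions is replaced by a single for-loop over the normalized characters that carries the undecided first character of each pair as state, the output is built as a joined list instead of repeated string concatenation, and the final even-length padding is dropped because the pair builder always emits whole pairs.
import Mathlib
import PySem

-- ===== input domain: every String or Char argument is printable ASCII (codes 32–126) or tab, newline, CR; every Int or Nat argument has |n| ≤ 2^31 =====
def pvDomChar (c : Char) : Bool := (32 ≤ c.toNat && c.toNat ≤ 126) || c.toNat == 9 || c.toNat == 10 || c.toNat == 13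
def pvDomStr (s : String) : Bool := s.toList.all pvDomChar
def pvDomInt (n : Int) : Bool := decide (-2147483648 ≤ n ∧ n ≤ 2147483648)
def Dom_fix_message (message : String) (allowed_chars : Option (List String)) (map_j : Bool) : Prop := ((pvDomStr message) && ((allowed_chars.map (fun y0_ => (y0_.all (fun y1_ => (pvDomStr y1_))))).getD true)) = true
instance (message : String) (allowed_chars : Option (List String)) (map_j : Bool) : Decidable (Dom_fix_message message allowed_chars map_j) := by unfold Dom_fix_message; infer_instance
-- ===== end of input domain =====

-- B replaces A's index-stepping while loop by a single pass carrying a pending first-of-pair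
-- character and drops the (always vacuous) final even-length padding; objective: idiomatic.

-- ===== PORT A =====
-- A's while loop: a = message[i], b = message[i+1] or "X"; equal pair emits a+"X" and advances
-- by 1, otherwise emits a+b and advances by 2 (recursing on rest / rest.tail).
def pairLoopA : List Char → List Char
  | [] => []
  | a :: rest =>
    let b := rest.headD 'X'
    if a == b then a :: 'X' :: pairLoopA rest
    else a :: b :: pairLoopA rest.tail
termination_by l => l.length
decreasing_by all_goals (simp [List.length_tail]; try omega)

def fix_message (message : String) (allowed_chars : Option (List String)) (map_j : Bool) : String :=
  let msg : List Char :=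
    match allowed_chars with
    | none =>
        -- 'A' <= ch <= 'Z' on single-char strings is exactly the Char comparison
        (PySem.Chars.replace (PySem.Chars.upper message.toList) ['J'] ['I']).filter
          (fun ch => decide ('A' ≤ ch ∧ ch ≤ 'Z'))
    | some allowed =>
        let s0 := message.toList
        let s1 := if map_j then PySem.Chars.replace s0 ['J'] ['I'] else s0
        let s2 := if map_j then PySem.Chars.upper s1 else s1
        s2.filter (fun ch => allowed.contains (String.mk [ch]))
  let result := pairLoopA msg
  let result := if result.length % 2 ≠ 0 then result ++ ['X'] else result
  String.mk result

-- ===== PORT B =====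
-- B's loop body: pending None → remember ch; ch == pending → emit pending+"X", keep ch pending;
-- otherwise emit pending+ch and clear pending.
def stepB (st : List Char × Option Char) (ch : Char) : List Char × Option Char :=
  match st.2 with
  | none => (st.1, some ch)
  | some p => if ch == p then (st.1 ++ [p, 'X'], some ch) else (st.1 ++ [p, ch], none)

def fix_message_alt (message : String) (allowed_chars : Option (List String)) (map_j : Bool) : String :=
  let norm : List Char :=
    match allowed_chars with
    | none =>
        (PySem.Chars.replace (PySem.Chars.upper message.toList) ['J'] ['I']).filter
          (fun ch => decide ('A' ≤ ch ∧ ch ≤ 'Z'))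
    | some allowed =>
        let s := if map_j then PySem.Chars.upper (PySem.Chars.replace message.toList ['J'] ['I'])
                 else message.toList
        s.filter (fun ch => allowed.contains (String.mk [ch]))
  let st := norm.foldl stepB ([], none)
  let out := match st.2 with
    | none => st.1
    | some p => st.1 ++ [p, 'X']
  String.mk out

-- ===== PRECONDITION & SPEC =====
def Spec_fix_message (message : String) (allowed_chars : Option (List String)) (map_j : Bool) (out : String) : Prop := out = fix_message_alt message allowed_chars map_j
instance (message : String) (allowed_chars : Option (List String)) (map_j : Bool) (out : String) : Decidable (Spec_fix_message message allowed_chars map_j out) := by unfold Spec_fix_message; infer_instance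

-- ===== CLAIM (what is proved, stated in full; the proofs are below) =====
def Claim_equal_fix_message : Prop := ∀ (message : String) (allowed_chars : Option (List String)) (map_j : Bool), Dom_fix_message message allowed_chars map_j → Spec_fix_message message allowed_chars map_j (fix_message message allowed_chars map_j)

-- ===== LEMMAS AND PROOFS =====

def finishB (st : List Char × Option Char) : List Char :=
  match st.2 with
  | none => st.1
  | some p => st.1 ++ [p, 'X']

theorem keySome : ∀ (n : Nat) (l : List Char), l.length ≤ n → ∀ (acc : List Char) (p : Char),
    finishB (l.foldl stepB (acc, some p)) = acc ++ pairLoopA (p :: l) := by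
  intro n
  induction n with
  | zero =>
    intro l hl acc p
    have : l = [] := List.eq_nil_of_length_eq_zero (Nat.le_zero.mp hl)
    subst this
    simp [finishB, pairLoopA]
  | succ n ih =>
    intro l hl acc p
    cases l with
    | nil => simp [finishB, pairLoopA]
    | cons c rest =>
      simp only [List.foldl_cons]
      by_cases hcp : c = p
      · subst hcp
        simp only [stepB, beq_self_eq_true, if_pos]
        rw [ih rest (by simpa using Nat.lt_succ_iff.mp (Nat.lt_of_lt_of_le (by simp) hl)) ]
        simp [pairLoopA]
      · have hbeq : (c == p) = false := beq_eq_false_iff_ne.mpr hcp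
        simp only [stepB, hbeq, if_neg, Bool.false_eq_true, not_false_iff]
        cases rest with
        | nil =>
          simp [finishB, pairLoopA, beq_eq_false_iff_ne.mpr (Ne.symm hcp)]
        | cons r rs =>
          simp only [List.foldl_cons, stepB]
          rw [ih rs (by simp at hl ⊢; omega)]
          simp [pairLoopA, beq_eq_false_iff_ne.mpr (Ne.symm hcp)]

theorem keyNone (l : List Char) :
    finishB (l.foldl stepB ([], none)) = pairLoopA l := by
  cases l with
  | nil => simp [finishB, pairLoopA]
  | cons a rest =>
    simp only [List.foldl_cons, stepB]
    simpa using keySome rest.length rest le_rfl [] a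

theorem lenEven : ∀ (n : Nat) (l : List Char), l.length ≤ n → (pairLoopA l).length % 2 = 0 := by
  intro n
  induction n with
  | zero =>
    intro l hl
    have : l = [] := List.eq_nil_of_length_eq_zero (Nat.le_zero.mp hl)
    subst this; simp [pairLoopA]
  | succ n ih =>
    intro l hl
    cases l with
    | nil => simp [pairLoopA]
    | cons a rest =>
      simp only [pairLoopA]
      split
      · have := ih rest (by simp at hl; omega)
        simp; omega
      · have := ih rest.tail (by simp [List.length_tail] at hl ⊢; omega)
        simp; omega

theorem core_eq (m : List Char) :
    String.mk (if (pairLoopA m).length % 2 ≠ 0 then pairLoopA m ++ ['X'] else pairLoopA m)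
    = String.mk (finishB (m.foldl stepB ([], none))) := by
  rw [keyNone m]
  simp [lenEven m.length m le_rfl]

-- ===== VERDICT (by name: the statement is the Claim_ definition above) =====
theorem fix_message_spec : Claim_equal_fix_message := by
  intro message allowed_chars map_j _
  unfold Spec_fix_message fix_message fix_message_alt
  cases allowed_chars with
  | none => exact core_eq _
  | some allowed => cases map_j <;> exact core_eq _
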